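-- pv_equiv track=rewrite | github.com/Kellogio/RandomCode | Cycling Matrix/cycler.py | increase_clique_size
-- ===== SOURCE A (Python) =====
-- from typing import List, Set, Optional, Iterable, Union
--
-- def increase_clique_size(adjacency_list: List[Set[int]], clique_size: int, current_clique: List[int],
--                          remaining_vertices: Set[int]) -> Iterable[List[int]]:
--     remaining_vertices_to_add = clique_size - len(current_clique)
--     if remaining_vertices_to_add <= 0:
--         yield current_clique
--     elif remaining_vertices_to_add == len(remaining_vertices):
--         yield current_clique + list(remaining_vertices)
--     elif remaining_vertices_to_add <= len(remaining_vertices):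
--         for candidate_vertex in remaining_vertices:
--             # Reduce the remaining vertices by the intersection of the adjacent vertices
--             # to the candidate
--             candidate_remaining_vertices = remaining_vertices.intersection(adjacency_list[candidate_vertex])
--             yield from increase_clique_size(adjacency_list, clique_size, current_clique + [candidate_vertex],
--                                             candidate_remaining_vertices)
-- ===== SOURCE B (Python) =====
-- def increase_clique_size(adjacency_list, clique_size, current_clique, remaining_vertices):
--     # Iterative DFS with an explicit stack instead of recursion (same yield order).
--     stack = [(current_clique, remaining_vertices)]
--     while stack:
--         cur, rem = stack.pop()
--         need = clique_size - len(cur)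
--         if need <= 0:
--             yield cur
--         elif need == len(rem):
--             yield cur + list(rem)
--         elif need <= len(rem):
--             for c in reversed(list(rem)):
--                 stack.append((cur + [c], rem.intersection(adjacency_list[c])))
-- ===== Notes on version B (the rewrite author's own statement) =====
-- stated objective: alternative
-- what changed: A's recursive generator is replaced by an iterative DFS over an explicit LIFO stack of (clique, remaining) frames, pushing the candidates of each expanded frame in reverse so pops reproduce A's yield order.
import Mathlib
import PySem

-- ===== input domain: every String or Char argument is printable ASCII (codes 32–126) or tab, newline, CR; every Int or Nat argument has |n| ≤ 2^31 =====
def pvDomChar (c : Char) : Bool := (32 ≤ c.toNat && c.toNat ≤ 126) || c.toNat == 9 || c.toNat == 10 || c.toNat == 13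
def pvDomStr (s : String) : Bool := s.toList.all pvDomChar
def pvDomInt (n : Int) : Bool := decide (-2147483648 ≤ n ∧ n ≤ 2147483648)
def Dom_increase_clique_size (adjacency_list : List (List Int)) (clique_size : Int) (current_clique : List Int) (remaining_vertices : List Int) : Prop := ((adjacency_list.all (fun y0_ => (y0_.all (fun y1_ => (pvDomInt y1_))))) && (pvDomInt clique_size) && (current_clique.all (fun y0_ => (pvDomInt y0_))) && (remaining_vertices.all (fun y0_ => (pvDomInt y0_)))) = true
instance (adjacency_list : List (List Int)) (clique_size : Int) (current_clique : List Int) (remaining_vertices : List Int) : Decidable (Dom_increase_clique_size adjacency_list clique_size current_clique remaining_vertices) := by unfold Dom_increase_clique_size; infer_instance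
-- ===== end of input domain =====

-- B replaces A's recursive generator by an iterative DFS with an explicit LIFO stack (alternative
-- decomposition, same yields in the same order).

-- ===== PORT A =====
-- Literal transliteration of A's recursive generator; 'yield from' over the loop is the
-- in-order concatenation (flatMap) of the recursive results.
def increase_clique_size (adjacency_list : List (List Int)) (clique_size : Int) (current_clique : List Int) (remaining_vertices : List Int) : List (List Int) :=
  let remaining_vertices_to_add := clique_size - current_clique.length
  if _h1 : remaining_vertices_to_add ≤ 0 then
    [current_clique]
  else if remaining_vertices_to_add = remaining_vertices.length then
    [current_clique ++ remaining_vertices]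
  else if remaining_vertices_to_add ≤ remaining_vertices.length then
    remaining_vertices.flatMap (fun candidate_vertex =>
      increase_clique_size adjacency_list clique_size (current_clique ++ [candidate_vertex])
        (PySem.Set.inter remaining_vertices (PySem.List.pyGetD adjacency_list candidate_vertex [])))
  else []
termination_by (clique_size - current_clique.length).toNat
decreasing_by simp_all; omega

-- ===== PORT B =====
-- B's while-loop over the explicit stack (top of the Python stack = head of this list).
-- pvPushB is B's inner for-loop: pushing one frame per candidate of 'reversed(list(rem))'.
def pvPushB (adjacency_list : List (List Int)) (cur rem : List Int) (rest : List (List Int × List Int)) : List (List Int × List Int) :=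
  rem.reverse.foldl (fun st c =>
    (cur ++ [c], PySem.Set.inter rem (PySem.List.pyGetD adjacency_list c [])) :: st) rest

-- Pushing frames one by one for a reversed list prepends the frames in list order.
theorem pvFoldrConsMap {α β : Type} (g : α → β) (l : List α) (rest : List β) :
    List.foldr (fun c st => g c :: st) rest l = l.map g ++ rest := by
  induction l with
  | nil => rfl
  | cons a l ih => simp only [List.foldr_cons, List.map_cons, List.cons_append, ih]

theorem pvPushB_eq (adjacency_list : List (List Int)) (cur rem : List Int) (rest : List (List Int × List Int)) :
    pvPushB adjacency_list cur rem rest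
      = rem.map (fun c => (cur ++ [c], PySem.Set.inter rem (PySem.List.pyGetD adjacency_list c []))) ++ rest := by
  unfold pvPushB
  rw [List.foldl_reverse]
  exact pvFoldrConsMap _ rem rest

def pvLoopB (adjacency_list : List (List Int)) (clique_size : Int) (stack : List (List Int × List Int)) (out : List (List Int)) : List (List Int) :=
  match stack with
  | [] => out
  | (cur, rem) :: rest =>
    let need := clique_size - cur.length
    if need ≤ 0 then
      pvLoopB adjacency_list clique_size rest (out ++ [cur])
    else if need = rem.length then
      pvLoopB adjacency_list clique_size rest (out ++ [cur ++ rem])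
    else if need ≤ rem.length then
      pvLoopB adjacency_list clique_size (pvPushB adjacency_list cur rem rest) out
    else pvLoopB adjacency_list clique_size rest out
termination_by (stack.map (fun p => (p.2.length + 1) ^ (clique_size - p.1.length).toNat)).sum
decreasing_by
  all_goals simp
  rename_i h1 _h2 _h3
  rw [pvPushB_eq]
  simp only [List.map_append, List.sum_append]
  apply Nat.add_lt_add_right
  refine lt_of_le_of_lt
    (List.sum_le_card_nsmul _ ((rem.length + 1) ^ (clique_size.toNat - (cur.length + 1))) ?_) ?_
  · intro x hx
    simp only [List.map_map, List.mem_map, Function.comp] at hx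
    obtain ⟨c, -, rfl⟩ := hx
    simp only [List.length_append, List.length_cons, List.length_nil]
    apply Nat.pow_le_pow_left
    have h : (PySem.Set.inter rem (PySem.List.pyGetD adjacency_list c [])).length ≤ rem.length :=
      List.length_filter_le _ _
    omega
  · simp only [List.length_map, smul_eq_mul]
    have hstep : clique_size.toNat - cur.length = (clique_size.toNat - (cur.length + 1)) + 1 := by
      omega
    rw [hstep, pow_succ]
    have hp : 0 < (rem.length + 1) ^ (clique_size.toNat - (cur.length + 1)) := by positivity
    nlinarith

def increase_clique_size_alt (adjacency_list : List (List Int)) (clique_size : Int) (current_clique : List Int) (remaining_vertices : List Int) : List (List Int) :=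
  pvLoopB adjacency_list clique_size [(current_clique, remaining_vertices)] []

-- ===== PRECONDITION & SPEC =====
-- Pre_ excludes exactly the inputs on which Python A raises IndexError: the candidate loop runs
-- (0 < clique_size - len(current_clique) < len(remaining_vertices)) and indexes every remaining
-- vertex into adjacency_list, so some vertex is outside range(-len, len); B raises there too.
def Pre_increase_clique_size (adjacency_list : List (List Int)) (clique_size : Int) (current_clique : List Int) (remaining_vertices : List Int) : Prop :=
  (∀ v ∈ remaining_vertices, -(adjacency_list.length : Int) ≤ v ∧ v < (adjacency_list.length : Int)) ∨
    clique_size - current_clique.length ≤ 0 ∨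
    (remaining_vertices.length : Int) ≤ clique_size - current_clique.length
instance (adjacency_list : List (List Int)) (clique_size : Int) (current_clique : List Int) (remaining_vertices : List Int) : Decidable (Pre_increase_clique_size adjacency_list clique_size current_clique remaining_vertices) := by unfold Pre_increase_clique_size; infer_instance

def pvWitness_increase_clique_size : List (List Int) × Int × List Int × List Int :=
  ([[1, 2], [0, 2], [0, 1]], 2, [], [0, 1, 2])

def Spec_increase_clique_size (adjacency_list : List (List Int)) (clique_size : Int) (current_clique : List Int) (remaining_vertices : List Int) (out : List (List Int)) : Prop := out = increase_clique_size_alt adjacency_list clique_size current_clique remaining_vertices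
instance (adjacency_list : List (List Int)) (clique_size : Int) (current_clique : List Int) (remaining_vertices : List Int) (out : List (List Int)) : Decidable (Spec_increase_clique_size adjacency_list clique_size current_clique remaining_vertices out) := by unfold Spec_increase_clique_size; infer_instance

-- ===== CLAIM (what is proved, stated in full; the proofs are below) =====
def Claim_equal_increase_clique_size : Prop := ∀ (adjacency_list : List (List Int)) (clique_size : Int) (current_clique : List Int) (remaining_vertices : List Int), Dom_increase_clique_size adjacency_list clique_size current_clique remaining_vertices → Pre_increase_clique_size adjacency_list clique_size current_clique remaining_vertices → Spec_increase_clique_size adjacency_list clique_size current_clique remaining_vertices (increase_clique_size adjacency_list clique_size current_clique remaining_vertices)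

-- ===== LEMMAS AND PROOFS =====

-- Branch characterisations of port A (one per branch of the Python if-chain).
theorem pvA_base (adj : List (List Int)) (k : Int) (cur rem : List Int)
    (h : k - cur.length ≤ 0) : increase_clique_size adj k cur rem = [cur] := by
  rw [increase_clique_size]; simp [h]

theorem pvA_all (adj : List (List Int)) (k : Int) (cur rem : List Int)
    (h1 : ¬ k - cur.length ≤ 0) (h2 : k - cur.length = rem.length) :
    increase_clique_size adj k cur rem = [cur ++ rem] := by
  rw [increase_clique_size]; simp [h1, h2]

theorem pvA_rec (adj : List (List Int)) (k : Int) (cur rem : List Int)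
    (h1 : ¬ k - cur.length ≤ 0) (h2 : ¬ k - cur.length = rem.length) (h3 : k - cur.length ≤ rem.length) :
    increase_clique_size adj k cur rem
      = rem.flatMap (fun c => increase_clique_size adj k (cur ++ [c])
          (PySem.Set.inter rem (PySem.List.pyGetD adj c []))) := by
  rw [increase_clique_size]; simp [h1, h2, h3]

theorem pvA_none (adj : List (List Int)) (k : Int) (cur rem : List Int)
    (h1 : ¬ k - cur.length ≤ 0) (h2 : ¬ k - cur.length = rem.length) (h3 : ¬ k - cur.length ≤ rem.length) :
    increase_clique_size adj k cur rem = [] := by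
  rw [increase_clique_size]; simp [h1, h2, h3]

theorem pvLoopB_eq (adjacency_list : List (List Int)) (clique_size : Int) :
    ∀ (stack : List (List Int × List Int)) (out : List (List Int)),
      pvLoopB adjacency_list clique_size stack out
        = out ++ stack.flatMap (fun p => increase_clique_size adjacency_list clique_size p.1 p.2) := by
  intro stack out
  induction stack, out using pvLoopB.induct adjacency_list clique_size with
  | case1 out => simp [pvLoopB]
  | case2 out cur rem rest need h1 ih =>
    have h1' : clique_size - (cur.length : Int) ≤ 0 := h1
    simp only [pvLoopB]
    split_ifs <;> try (exfalso; omega)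
    rw [ih]
    simp only [List.flatMap_cons]
    rw [pvA_base adjacency_list clique_size cur rem h1']
    simp
  | case3 out cur rem rest need h1 h2 ih =>
    have h1' : ¬ clique_size - (cur.length : Int) ≤ 0 := h1
    have h2' : clique_size - (cur.length : Int) = rem.length := h2
    simp only [pvLoopB]
    split_ifs <;> try (exfalso; omega)
    rw [ih]
    simp only [List.flatMap_cons]
    rw [pvA_all adjacency_list clique_size cur rem h1' h2']
    simp
  | case4 out cur rem rest need h1 h2 h3 ih =>
    have h1' : ¬ clique_size - (cur.length : Int) ≤ 0 := h1
    have h2' : ¬ clique_size - (cur.length : Int) = rem.length := h2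
    have h3' : clique_size - (cur.length : Int) ≤ rem.length := h3
    simp only [pvLoopB]
    split_ifs <;> try (exfalso; omega)
    rw [ih, pvPushB_eq]
    simp only [List.flatMap_cons]
    rw [pvA_rec adjacency_list clique_size cur rem h1' h2' h3']
    simp [List.flatMap_append, List.flatMap_map, Function.comp]
  | case5 out cur rem rest need h1 h2 h3 ih =>
    have h1' : ¬ clique_size - (cur.length : Int) ≤ 0 := h1
    have h2' : ¬ clique_size - (cur.length : Int) = rem.length := h2
    have h3' : ¬ clique_size - (cur.length : Int) ≤ rem.length := h3
    simp only [pvLoopB]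
    split_ifs <;> try (exfalso; omega)
    rw [ih]
    simp only [List.flatMap_cons]
    rw [pvA_none adjacency_list clique_size cur rem h1' h2' h3']
    simp

-- ===== VERDICT (by name: the statement is the Claim_ definition above) =====
theorem increase_clique_size_spec : Claim_equal_increase_clique_size := by
  intro adj k cur rem _ _
  unfold Spec_increase_clique_size increase_clique_size_alt
  rw [pvLoopB_eq]
  simp
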